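-- pv_equiv track=rewrite | github.com/veridock/video2svg | video2svg/svg_builder.py | _compress_attributes
-- ===== SOURCE A (Python) =====
-- def _compress_attributes(svg_content: str) -> str:
--     """
--     Kompresuje atrybuty SVG.
--     """
--     # Zastąp długie nazwy atrybutów skrótami
--     replacements = {
--         'stroke-width': 'sw',
--         'stroke-linecap': 'slc',
--         'stroke-linejoin': 'slj',
--         'font-family': 'ff',
--         'font-size': 'fs',
--         'text-anchor': 'ta'
--     }
--
--     for long_name, short_name in replacements.items():
--         svg_content = svg_content.replace(long_name, short_name)
--
--     return svg_content
-- ===== SOURCE B (Python) =====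
-- def _compress_attributes(svg_content: str) -> str:
--     """
--     Kompresuje atrybuty SVG.
--
--     Single left-to-right scan: at each position at most one long attribute
--     name can start (no name is a prefix of another); emit its abbreviation
--     and jump over it, otherwise copy the character.  Unlike six sequential
--     str.replace passes, an abbreviation never cascades into a new match.
--     """
--     out = []
--     i = 0
--     n = len(svg_content)
--     while i < n:
--         if svg_content.startswith('stroke-width', i):
--             out.append('sw')
--             i += 12
--         elif svg_content.startswith('stroke-linecap', i):
--             out.append('slc')
--             i += 14
--         elif svg_content.startswith('stroke-linejoin', i):
--             out.append('slj')
--             i += 15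
--         elif svg_content.startswith('font-family', i):
--             out.append('ff')
--             i += 11
--         elif svg_content.startswith('font-size', i):
--             out.append('fs')
--             i += 9
--         elif svg_content.startswith('text-anchor', i):
--             out.append('ta')
--             i += 11
--         else:
--             out.append(svg_content[i])
--             i += 1
--     return ''.join(out)
-- ===== Notes on version B (the rewrite author's own statement) =====
-- stated objective: alternative
-- what changed: B replaces the six sequential whole-string str.replace passes by one left-to-right scan that at each position matches at most one long attribute name and emits its abbreviation, so the string is traversed once and an inserted abbreviation can never cascade into a new match.
-- intended difference: On inputs containing the substring 'font-familyont-size', A's fourth pass turns 'font-family' into 'ff' whose trailing 'f' joins the following 'ont-size' to form a new 'font-size' that A's fifth pass also abbreviates (A yields 'ffs' there), while B abbreviates only attribute names present in the input and yields 'ffont-size' — the intended behaviour, since the compressor should only shorten attribute names actually written in the SVG, not artefacts of its own earlier substitutions. — e.g. on _compress_attributes("font-familyont-size"): A returns "ffs", B returns "ffont-size"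
import Mathlib
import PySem

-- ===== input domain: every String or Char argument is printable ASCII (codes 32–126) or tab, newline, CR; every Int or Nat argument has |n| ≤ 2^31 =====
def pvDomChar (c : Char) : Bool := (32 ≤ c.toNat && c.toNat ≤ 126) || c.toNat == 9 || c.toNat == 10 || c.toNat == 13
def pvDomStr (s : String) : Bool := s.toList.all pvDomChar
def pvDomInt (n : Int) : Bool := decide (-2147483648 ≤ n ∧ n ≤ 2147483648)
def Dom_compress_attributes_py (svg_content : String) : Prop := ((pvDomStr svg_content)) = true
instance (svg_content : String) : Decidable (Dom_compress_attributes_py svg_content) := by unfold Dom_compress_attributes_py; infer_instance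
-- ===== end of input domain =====

-- B replaces A's six sequential whole-string replace passes by one left-to-right scan,
-- so an inserted abbreviation never cascades into a new match (see D_ below for the one
-- behavioural change; objective: alternative single-pass algorithm).

-- ===== PORT A =====
def compress_attributes_py (svg_content : String) : String :=
  let replacements : PySem.Dict String String :=
    ((((((PySem.Dict.empty).insert "stroke-width" "sw").insert
        "stroke-linecap" "slc").insert
        "stroke-linejoin" "slj").insert
        "font-family" "ff").insert
        "font-size" "fs").insert
        "text-anchor" "ta"
  replacements.items.foldl (fun svg p => PySem.Str.replace svg p.1 p.2) svg_content

-- ===== PORT B =====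
-- the six long names and their abbreviations, as character lists
def K1 : List Char := ['s','t','r','o','k','e','-','w','i','d','t','h']
def A1 : List Char := ['s','w']
def K2 : List Char := ['s','t','r','o','k','e','-','l','i','n','e','c','a','p']
def A2 : List Char := ['s','l','c']
def K3 : List Char := ['s','t','r','o','k','e','-','l','i','n','e','j','o','i','n']
def A3 : List Char := ['s','l','j']
def K4 : List Char := ['f','o','n','t','-','f','a','m','i','l','y']
def A4 : List Char := ['f','f']
def K5 : List Char := ['f','o','n','t','-','s','i','z','e']
def A5 : List Char := ['f','s']
def K6 : List Char := ['t','e','x','t','-','a','n','c','h','o','r']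
def A6 : List Char := ['t','a']

-- one pass over the characters: at each position try the six names (Source B's if/elif chain)
def scanGo : List Char → List Char
  | [] => []
  | c :: t =>
    if K1.isPrefixOf (c :: t) then A1 ++ scanGo (t.drop 11)
    else if K2.isPrefixOf (c :: t) then A2 ++ scanGo (t.drop 13)
    else if K3.isPrefixOf (c :: t) then A3 ++ scanGo (t.drop 14)
    else if K4.isPrefixOf (c :: t) then A4 ++ scanGo (t.drop 10)
    else if K5.isPrefixOf (c :: t) then A5 ++ scanGo (t.drop 8)
    else if K6.isPrefixOf (c :: t) then A6 ++ scanGo (t.drop 10)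
    else c :: scanGo t
termination_by l => l.length
decreasing_by all_goals (simp; try omega)

def compress_attributes_py_alt (svg_content : String) : String :=
  String.ofList (scanGo svg_content.toList)

-- ===== PRECONDITION & SPEC =====
-- On inputs containing 'font-familyont-size', A's fourth pass rewrites 'font-family' to 'ff'
-- whose trailing 'f' joins the following 'ont-size' into a new 'font-size' that A's fifth pass
-- also abbreviates (A yields 'ffs' there), while B abbreviates only names present in the input
-- and yields 'ffont-size' — the intended behaviour: the compressor should shorten attribute
-- names written in the SVG, not artefacts of its own earlier substitutions.
def D_compress_attributes_py (svg_content : String) : Prop :=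
  PySem.Str.isIn "font-familyont-size" svg_content = true
instance (svg_content : String) : Decidable (D_compress_attributes_py svg_content) := by
  unfold D_compress_attributes_py; infer_instance

def Spec_compress_attributes_py (svg_content : String) (out : String) : Prop :=
  ¬ D_compress_attributes_py svg_content → out = compress_attributes_py_alt svg_content
instance (svg_content : String) (out : String) : Decidable (Spec_compress_attributes_py svg_content out) := by
  unfold Spec_compress_attributes_py; infer_instance

def pvDiffWitness_compress_attributes_py : String := "font-familyont-size"
def pvDiffWitnessOut_compress_attributes_py : String × String := ("ffs", "ffont-size")

-- ===== CLAIM (what is proved, stated in full; the proofs are below) =====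
def Claim_unchanged_compress_attributes_py : Prop := ∀ (svg_content : String), Dom_compress_attributes_py svg_content → Spec_compress_attributes_py svg_content (compress_attributes_py svg_content)
def Claim_changed_compress_attributes_py : Prop := Dom_compress_attributes_py (pvDiffWitness_compress_attributes_py) ∧ D_compress_attributes_py (pvDiffWitness_compress_attributes_py) ∧ compress_attributes_py (pvDiffWitness_compress_attributes_py) = pvDiffWitnessOut_compress_attributes_py.1 ∧ compress_attributes_py_alt (pvDiffWitness_compress_attributes_py) = pvDiffWitnessOut_compress_attributes_py.2 ∧ pvDiffWitnessOut_compress_attributes_py.1 ≠ pvDiffWitnessOut_compress_attributes_py.2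

def Claim_exact_compress_attributes_py : Prop := ∀ (svg_content : String), Dom_compress_attributes_py svg_content → D_compress_attributes_py svg_content → compress_attributes_py svg_content ≠ compress_attributes_py_alt svg_content

-- ===== LEMMAS AND PROOFS =====

-- one str.replace pass, written structurally (proof-side characterisation of PySem.Chars.replace)
def scan1 (old new : List Char) : List Char → List Char
  | [] => []
  | c :: t =>
    if old.isPrefixOf (c :: t) then new ++ scan1 old new (t.drop (old.length - 1))
    else c :: scan1 old new t
termination_by l => l.length
decreasing_by all_goals (simp; try omega)

-- the six passes of A, composed
def passes (l : List Char) : List Char :=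
  scan1 K6 A6 (scan1 K5 A5 (scan1 K4 A4 (scan1 K3 A3 (scan1 K2 A2 (scan1 K1 A1 l)))))

-- the pattern on which A cascades, and its tail after 'font-family'
def PL : List Char := ['f','o','n','t','-','f','a','m','i','l','y','o','n','t','-','s','i','z','e']
def OS : List Char := ['o','n','t','-','s','i','z','e']

theorem replace_go_eq (old new : List Char) (hold : old ≠ []) :
    ∀ (fuel : Nat) (l acc : List Char), l.length ≤ fuel →
      PySem.Chars.replace.go old new fuel l acc = acc.reverse ++ scan1 old new l := by
  intro fuel
  induction fuel with
  | zero =>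
    intro l acc hl
    have : l = [] := List.length_eq_zero_iff.mp (Nat.le_zero.mp hl)
    subst this
    simp [PySem.Chars.replace.go, scan1]
  | succ n ih =>
    intro l acc hl
    cases l with
    | nil => simp [PySem.Chars.replace.go, scan1]
    | cons c t =>
      rw [PySem.Chars.replace.go]
      by_cases hm : old.isPrefixOf (c :: t)
      · rw [if_pos hm]
        obtain ⟨o, os, ho⟩ : ∃ o os, old = o :: os := by
          cases old with
          | nil => exact absurd rfl hold
          | cons o os => exact ⟨o, os, rfl⟩
        have hdrop : (c :: t).drop old.length = t.drop (old.length - 1) := by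
          subst ho; simp
        have hlen : (t.drop (old.length - 1)).length ≤ n := by
          simp at hl ⊢; omega
        rw [hdrop, ih _ _ hlen]
        rw [scan1, if_pos hm]
        simp
      · rw [if_neg hm]
        have hlen : t.length ≤ n := by simp at hl; omega
        rw [ih _ _ hlen]
        rw [scan1, if_neg hm]
        simp

theorem replace_eq_scan1 (s old new : List Char) (hold : old ≠ []) :
    PySem.Chars.replace s old new = scan1 old new s := by
  rw [PySem.Chars.replace, if_neg (by simpa [List.isEmpty_iff] using hold)]
  simpa using replace_go_eq old new hold s.length s [] (le_refl _)

theorem prefix_append_cases {y u v : List Char} (h : y <+: u ++ v) : y <+: u ∨ u <+: y :=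
  List.prefix_or_prefix_of_prefix h (List.prefix_append u v)

theorem scan1_append (old new : List Char) :
    ∀ (w x : List Char), (∀ p, p < w.length → ¬ old <+: (w.drop p ++ x)) →
      scan1 old new (w ++ x) = w ++ scan1 old new x := by
  intro w
  induction w with
  | nil => intro x _; simp
  | cons c t ih =>
    intro x h
    have h0 : ¬ old.isPrefixOf (c :: (t ++ x)) := by
      have := h 0 (by simp)
      simpa [List.isPrefixOf_iff_prefix] using this
    rw [List.cons_append, scan1, if_neg h0]
    rw [ih x (fun p hp => by simpa using h (p + 1) (by simpa using Nat.succ_lt_succ hp))]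
    rfl

theorem no_match_in (w old x : List Char)
    (h : ∀ p, p < w.length → ¬ (old <+: w.drop p) ∧ ¬ (w.drop p <+: old)) :
    ∀ p, p < w.length → ¬ old <+: (w.drop p ++ x) := by
  intro p hp hpre
  rcases prefix_append_cases hpre with h' | h'
  · exact (h p hp).1 h'
  · exact (h p hp).2 h'

theorem scan1_append' (old new w : List Char)
    (h : ∀ p, p < w.length → ¬ (old <+: w.drop p) ∧ ¬ (w.drop p <+: old)) :
    ∀ x, scan1 old new (w ++ x) = w ++ scan1 old new x :=
  fun x => scan1_append old new w x (no_match_in w old x h)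

theorem scan1_self_append' (old new : List Char) (hold : old ≠ []) :
    ∀ x, scan1 old new (old ++ x) = new ++ scan1 old new x := by
  intro x
  obtain ⟨o, os, ho⟩ : ∃ o os, old = o :: os := by
    cases old with
    | nil => exact absurd rfl hold
    | cons o os => exact ⟨o, os, rfl⟩
  subst ho
  rw [List.cons_append, scan1, if_pos (by simp [List.isPrefixOf_iff_prefix])]
  simp

theorem scan1_prefix_iff (old new : List Char) (_hold : old ≠ []) :
    ∀ (n : Nat) (r w : List Char), r.length ≤ n →
      (∀ p, p < w.length → ¬ (new <+: w.drop p) ∧ ¬ (w.drop p <+: new)) →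
      (∀ p, p < w.length → ¬ (old <+: w.drop p) ∧ ¬ (w.drop p <+: old)) →
      (w <+: scan1 old new r ↔ w <+: r) := by
  intro n
  induction n with
  | zero =>
    intro r w hr _ _
    have : r = [] := List.length_eq_zero_iff.mp (Nat.le_zero.mp hr)
    subst this
    simp [scan1]
  | succ n ih =>
    intro r w hr ha hb
    cases r with
    | nil => simp [scan1]
    | cons c t =>
      cases w with
      | nil => simp
      | cons w0 w' =>
        by_cases hm : old.isPrefixOf (c :: t)
        · constructor
          · intro hpre
            rw [scan1, if_pos hm] at hpre
            rcases prefix_append_cases hpre with h' | h'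
            · exact absurd h' (by simpa using (ha 0 (by simp)).2)
            · exact absurd h' (by simpa using (ha 0 (by simp)).1)
          · intro hpre
            rcases List.prefix_or_prefix_of_prefix (List.isPrefixOf_iff_prefix.mp hm) hpre with h' | h'
            · exact absurd h' (by simpa using (hb 0 (by simp)).1)
            · exact absurd h' (by simpa using (hb 0 (by simp)).2)
        · rw [scan1, if_neg hm]
          have ha' : ∀ p, p < w'.length → ¬ (new <+: w'.drop p) ∧ ¬ (w'.drop p <+: new) := by
            intro p hp
            simpa using ha (p + 1) (by simpa using Nat.succ_lt_succ hp)
          have hb' : ∀ p, p < w'.length → ¬ (old <+: w'.drop p) ∧ ¬ (w'.drop p <+: old) := by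
            intro p hp
            simpa using hb (p + 1) (by simpa using Nat.succ_lt_succ hp)
          have := ih t w' (by simp at hr; omega) ha' hb'
          simp [List.cons_prefix_cons, this]

theorem prefix_iff' (old new : List Char) (hold : old ≠ []) (w : List Char)
    (ha : ∀ p, p < w.length → ¬ (new <+: w.drop p) ∧ ¬ (w.drop p <+: new))
    (hb : ∀ p, p < w.length → ¬ (old <+: w.drop p) ∧ ¬ (w.drop p <+: old))
    (r : List Char) : (w <+: scan1 old new r ↔ w <+: r) :=
  scan1_prefix_iff old new hold r.length r w le_rfl ha hb

-- a later-name head match never appears from already-processed text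
theorem head_no_match (Kj : List Char) (kj0 : Char) (W : List Char) (hKj : Kj = kj0 :: W)
    (c : Char) (t X : List Char) (hiff : W <+: X ↔ W <+: t)
    (hj : ¬ Kj.isPrefixOf (c :: t) = true) : ¬ Kj.isPrefixOf (c :: X) = true := by
  intro h'
  apply hj
  have h'' := List.isPrefixOf_iff_prefix.mp h'
  rw [hKj, List.cons_prefix_cons] at h''
  exact List.isPrefixOf_iff_prefix.mpr (by rw [hKj, List.cons_prefix_cons]; exact ⟨h''.1, hiff.mp h''.2⟩)

-- scanGo on each of the six name-at-head shapes (conditions reduce definitionally)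
theorem scanGo_br1 (r : List Char) : scanGo (K1 ++ r) = A1 ++ scanGo r := by
  rw [show K1 ++ r = 's'::'t'::'r'::'o'::'k'::'e'::'-'::'w'::'i'::'d'::'t'::'h'::r from rfl, scanGo]
  rfl

theorem scanGo_br2 (r : List Char) : scanGo (K2 ++ r) = A2 ++ scanGo r := by
  rw [show K2 ++ r = 's'::'t'::'r'::'o'::'k'::'e'::'-'::'l'::'i'::'n'::'e'::'c'::'a'::'p'::r from rfl, scanGo]
  rfl

theorem scanGo_br3 (r : List Char) : scanGo (K3 ++ r) = A3 ++ scanGo r := by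
  rw [show K3 ++ r = 's'::'t'::'r'::'o'::'k'::'e'::'-'::'l'::'i'::'n'::'e'::'j'::'o'::'i'::'n'::r from rfl, scanGo]
  rfl

theorem scanGo_br4 (r : List Char) : scanGo (K4 ++ r) = A4 ++ scanGo r := by
  rw [show K4 ++ r = 'f'::'o'::'n'::'t'::'-'::'f'::'a'::'m'::'i'::'l'::'y'::r from rfl, scanGo]
  rfl

theorem scanGo_br5 (r : List Char) : scanGo (K5 ++ r) = A5 ++ scanGo r := by
  rw [show K5 ++ r = 'f'::'o'::'n'::'t'::'-'::'s'::'i'::'z'::'e'::r from rfl, scanGo]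
  rfl

theorem scanGo_br6 (r : List Char) : scanGo (K6 ++ r) = A6 ++ scanGo r := by
  rw [show K6 ++ r = 't'::'e'::'x'::'t'::'-'::'a'::'n'::'c'::'h'::'o'::'r'::r from rfl, scanGo]
  rfl

theorem scanGo_cons_neg (c : Char) (t : List Char)
    (h1 : ¬ K1.isPrefixOf (c :: t) = true) (h2 : ¬ K2.isPrefixOf (c :: t) = true)
    (h3 : ¬ K3.isPrefixOf (c :: t) = true) (h4 : ¬ K4.isPrefixOf (c :: t) = true)
    (h5 : ¬ K5.isPrefixOf (c :: t) = true) (h6 : ¬ K6.isPrefixOf (c :: t) = true) :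
    scanGo (c :: t) = c :: scanGo t := by
  rw [scanGo, if_neg h1, if_neg h2, if_neg h3, if_neg h4, if_neg h5, if_neg h6]

-- 'ont-size' survives the first four passes unchanged as a prefix question
theorem OS_chain (t : List Char) :
    (OS <+: scan1 K4 A4 (scan1 K3 A3 (scan1 K2 A2 (scan1 K1 A1 t)))) ↔ OS <+: t := by
  rw [prefix_iff' K4 A4 (by decide) OS (by decide) (by decide),
      prefix_iff' K3 A3 (by decide) OS (by decide) (by decide),
      prefix_iff' K2 A2 (by decide) OS (by decide) (by decide),
      prefix_iff' K1 A1 (by decide) OS (by decide) (by decide)]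

theorem key_head_ne {K : List Char} {k0 : Char} {W : List Char} (hK : K = k0 :: W) {c : Char}
    (hne : k0 ≠ c) (z : List Char) : ¬ K.isPrefixOf (c :: z) = true := by
  intro hb
  have h' := List.isPrefixOf_iff_prefix.mp hb
  rw [hK, List.cons_prefix_cons] at h'
  exact hne h'.1

theorem scanGo_o (z : List Char) : scanGo ('o' :: z) = 'o' :: scanGo z :=
  scanGo_cons_neg 'o' z
    (key_head_ne (show (K1 : List Char) = 's' :: K1.drop 1 from by decide) (by decide) z)
    (key_head_ne (show (K2 : List Char) = 's' :: K2.drop 1 from by decide) (by decide) z)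
    (key_head_ne (show (K3 : List Char) = 's' :: K3.drop 1 from by decide) (by decide) z)
    (key_head_ne (show (K4 : List Char) = 'f' :: K4.drop 1 from by decide) (by decide) z)
    (key_head_ne (show (K5 : List Char) = 'f' :: K5.drop 1 from by decide) (by decide) z)
    (key_head_ne (show (K6 : List Char) = 't' :: K6.drop 1 from by decide) (by decide) z)

theorem OS_prefix_K4_append (r : List Char) (h : OS <+: r) : PL <+: K4 ++ r := by
  obtain ⟨z, hz⟩ := h
  exact ⟨z, by rw [show (PL : List Char) = K4 ++ OS from by decide, List.append_assoc, hz]⟩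

theorem PL_prefix_OS (r : List Char) (h : PL <+: K4 ++ r) : OS <+: r := by
  obtain ⟨z, hz⟩ := h
  rw [show (PL : List Char) = K4 ++ OS from by decide, List.append_assoc] at hz
  exact ⟨z, List.append_cancel_left hz⟩

-- if no occurrence of PL can start inside u, an occurrence in u ++ r lies in r
theorem infix_through (u : List Char)
    (hu : ∀ j, j < u.length → ¬ (u.drop j <+: PL) ∧ ¬ (PL <+: u.drop j)) :
    ∀ r, PL <:+: u ++ r → PL <:+: r := by
  induction u with
  | nil => simp
  | cons a u' ih =>
    intro r h
    rcases List.infix_cons_iff.mp h with h' | h'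
    · rcases prefix_append_cases (show PL <+: (a :: u') ++ r from h') with h'' | h''
      · exact absurd h'' (hu 0 (by simp)).2
      · exact absurd h'' (hu 0 (by simp)).1
    · exact ih (fun j hj => by simpa using hu (j + 1) (by simpa using Nat.succ_lt_succ hj)) r h'

-- the six passes on each branch shape
theorem passes_br1 (r : List Char) : passes (K1 ++ r) = A1 ++ passes r := by
  unfold passes
  rw [scan1_self_append' K1 A1 (by decide),
      scan1_append' K2 A2 A1 (by decide),
      scan1_append' K3 A3 A1 (by decide),
      scan1_append' K4 A4 A1 (by decide),
      scan1_append' K5 A5 A1 (by decide),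
      scan1_append' K6 A6 A1 (by decide)]

theorem passes_br2 (r : List Char) : passes (K2 ++ r) = A2 ++ passes r := by
  unfold passes
  rw [scan1_append' K1 A1 K2 (by decide),
      scan1_self_append' K2 A2 (by decide),
      scan1_append' K3 A3 A2 (by decide),
      scan1_append' K4 A4 A2 (by decide),
      scan1_append' K5 A5 A2 (by decide),
      scan1_append' K6 A6 A2 (by decide)]

theorem passes_br3 (r : List Char) : passes (K3 ++ r) = A3 ++ passes r := by
  unfold passes
  rw [scan1_append' K1 A1 K3 (by decide),
      scan1_append' K2 A2 K3 (by decide),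
      scan1_self_append' K3 A3 (by decide),
      scan1_append' K4 A4 A3 (by decide),
      scan1_append' K5 A5 A3 (by decide),
      scan1_append' K6 A6 A3 (by decide)]

theorem passes_br5 (r : List Char) : passes (K5 ++ r) = A5 ++ passes r := by
  unfold passes
  rw [scan1_append' K1 A1 K5 (by decide),
      scan1_append' K2 A2 K5 (by decide),
      scan1_append' K3 A3 K5 (by decide),
      scan1_append' K4 A4 K5 (by decide),
      scan1_self_append' K5 A5 (by decide),
      scan1_append' K6 A6 A5 (by decide)]

theorem passes_br6 (r : List Char) : passes (K6 ++ r) = A6 ++ passes r := by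
  unfold passes
  rw [scan1_append' K1 A1 K6 (by decide),
      scan1_append' K2 A2 K6 (by decide),
      scan1_append' K3 A3 K6 (by decide),
      scan1_append' K4 A4 K6 (by decide),
      scan1_append' K5 A5 K6 (by decide),
      scan1_self_append' K6 A6 (by decide)]

-- the delicate branch: 'font-family' at the head, no 'ont-size' right behind it
theorem passes_br4 (r : List Char) (hOSr : ¬ OS <+: r) : passes (K4 ++ r) = A4 ++ passes r := by
  unfold passes
  rw [scan1_append' K1 A1 K4 (by decide),
      scan1_append' K2 A2 K4 (by decide),
      scan1_append' K3 A3 K4 (by decide),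
      scan1_self_append' K4 A4 (by decide)]
  set X := scan1 K4 A4 (scan1 K3 A3 (scan1 K2 A2 (scan1 K1 A1 r))) with hX
  have hOSX : ¬ OS <+: X := by rw [hX, OS_chain]; exact hOSr
  have hc1 : ¬ K5.isPrefixOf ('f'::'f'::X) = true := by
    intro hb
    have h' := List.isPrefixOf_iff_prefix.mp hb
    rw [show (K5 : List Char) = 'f'::'o'::K5.drop 2 from by decide,
        List.cons_prefix_cons, List.cons_prefix_cons] at h'
    exact absurd h'.2.1 (by decide)
  have hc2 : ¬ K5.isPrefixOf ('f'::X) = true := by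
    intro hb
    have h' := List.isPrefixOf_iff_prefix.mp hb
    rw [show (K5 : List Char) = 'f' :: OS from by decide, List.cons_prefix_cons] at h'
    exact hOSX h'.2
  have e5 : scan1 K5 A5 ((A4 : List Char) ++ X) = (A4 : List Char) ++ scan1 K5 A5 X := by
    rw [show (A4 : List Char) ++ X = 'f'::'f'::X from rfl]
    rw [scan1, if_neg hc1]
    rw [scan1, if_neg hc2]
    rfl
  rw [e5, scan1_append' K6 A6 A4 (by decide)]

-- the cascading branch: 'font-family' with 'ont-size' right behind it
theorem passes_br4_diff (r : List Char) (hOS : OS <+: r) :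
    passes (K4 ++ r) = 'f'::'f'::'s'::
      scan1 K6 A6 (scan1 K5 A5 ((scan1 K4 A4 (scan1 K3 A3 (scan1 K2 A2 (scan1 K1 A1 r)))).drop 8)) := by
  unfold passes
  rw [scan1_append' K1 A1 K4 (by decide),
      scan1_append' K2 A2 K4 (by decide),
      scan1_append' K3 A3 K4 (by decide),
      scan1_self_append' K4 A4 (by decide)]
  set X := scan1 K4 A4 (scan1 K3 A3 (scan1 K2 A2 (scan1 K1 A1 r))) with hX
  have hOSX : OS <+: X := by rw [hX, OS_chain]; exact hOS
  have hc1 : ¬ K5.isPrefixOf ('f'::'f'::X) = true := by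
    intro hb
    have h' := List.isPrefixOf_iff_prefix.mp hb
    rw [show (K5 : List Char) = 'f'::'o'::K5.drop 2 from by decide,
        List.cons_prefix_cons, List.cons_prefix_cons] at h'
    exact absurd h'.2.1 (by decide)
  have hc2 : K5.isPrefixOf ('f'::X) = true :=
    List.isPrefixOf_iff_prefix.mpr (by
      rw [show (K5 : List Char) = 'f' :: OS from by decide, List.cons_prefix_cons]
      exact ⟨rfl, hOSX⟩)
  have e5 : scan1 K5 A5 ((A4 : List Char) ++ X) = 'f'::'f'::'s'::scan1 K5 A5 (X.drop 8) := by
    rw [show (A4 : List Char) ++ X = 'f'::'f'::X from rfl]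
    rw [scan1, if_neg hc1]
    rw [scan1, if_pos hc2]
    rfl
  rw [e5]
  rw [scan1, if_neg (key_head_ne (show (K6 : List Char) = 't' :: K6.drop 1 from by decide) (by decide) _)]
  rw [scan1, if_neg (key_head_ne (show (K6 : List Char) = 't' :: K6.drop 1 from by decide) (by decide) _)]
  rw [scan1, if_neg (key_head_ne (show (K6 : List Char) = 't' :: K6.drop 1 from by decide) (by decide) _)]

-- no name at the head: every pass copies the head character
theorem passes_cons_neg (c : Char) (t : List Char)
    (h1 : ¬ K1.isPrefixOf (c :: t) = true) (h2 : ¬ K2.isPrefixOf (c :: t) = true)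
    (h3 : ¬ K3.isPrefixOf (c :: t) = true) (h4 : ¬ K4.isPrefixOf (c :: t) = true)
    (h5 : ¬ K5.isPrefixOf (c :: t) = true) (h6 : ¬ K6.isPrefixOf (c :: t) = true) :
    passes (c :: t) = c :: passes t := by
  unfold passes
  rw [scan1, if_neg h1]
  rw [scan1, if_neg (head_no_match K2 's' (K2.drop 1) (by decide) c _ _
    (prefix_iff' K1 A1 (by decide) (K2.drop 1) (by decide) (by decide) t) h2)]
  rw [scan1, if_neg (head_no_match K3 's' (K3.drop 1) (by decide) c _ _
    (by rw [prefix_iff' K2 A2 (by decide) (K3.drop 1) (by decide) (by decide),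
            prefix_iff' K1 A1 (by decide) (K3.drop 1) (by decide) (by decide)]) h3)]
  rw [scan1, if_neg (head_no_match K4 'f' (K4.drop 1) (by decide) c _ _
    (by rw [prefix_iff' K3 A3 (by decide) (K4.drop 1) (by decide) (by decide),
            prefix_iff' K2 A2 (by decide) (K4.drop 1) (by decide) (by decide),
            prefix_iff' K1 A1 (by decide) (K4.drop 1) (by decide) (by decide)]) h4)]
  rw [scan1, if_neg (head_no_match K5 'f' (K5.drop 1) (by decide) c _ _
    (by rw [prefix_iff' K4 A4 (by decide) (K5.drop 1) (by decide) (by decide),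
            prefix_iff' K3 A3 (by decide) (K5.drop 1) (by decide) (by decide),
            prefix_iff' K2 A2 (by decide) (K5.drop 1) (by decide) (by decide),
            prefix_iff' K1 A1 (by decide) (K5.drop 1) (by decide) (by decide)]) h5)]
  rw [scan1, if_neg (head_no_match K6 't' (K6.drop 1) (by decide) c _ _
    (by rw [prefix_iff' K5 A5 (by decide) (K6.drop 1) (by decide) (by decide),
            prefix_iff' K4 A4 (by decide) (K6.drop 1) (by decide) (by decide),
            prefix_iff' K3 A3 (by decide) (K6.drop 1) (by decide) (by decide),
            prefix_iff' K2 A2 (by decide) (K6.drop 1) (by decide) (by decide),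
            prefix_iff' K1 A1 (by decide) (K6.drop 1) (by decide) (by decide)]) h6)]

theorem passes_eq_scanGo : ∀ (n : Nat) (l : List Char), l.length ≤ n → ¬ (PL <:+: l) →
    passes l = scanGo l := by
  intro n
  induction n with
  | zero =>
    intro l hl _
    have : l = [] := List.length_eq_zero_iff.mp (Nat.le_zero.mp hl)
    subst this
    simp [passes, scan1, scanGo]
  | succ n ih =>
    intro l hl hinf
    cases l with
    | nil => simp [passes, scan1, scanGo]
    | cons c t =>
      by_cases h1 : K1.isPrefixOf (c :: t)
      · obtain ⟨r, hr⟩ := List.isPrefixOf_iff_prefix.mp h1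
        rw [← hr] at hl hinf ⊢
        have hrlen : r.length ≤ n := by simp [K1] at hl; omega
        have hrinf : ¬ PL <:+: r := fun hc => hinf (hc.trans (List.suffix_append K1 r).isInfix)
        rw [passes_br1, scanGo_br1, ih r hrlen hrinf]
      · by_cases h2 : K2.isPrefixOf (c :: t)
        · obtain ⟨r, hr⟩ := List.isPrefixOf_iff_prefix.mp h2
          rw [← hr] at hl hinf ⊢
          have hrlen : r.length ≤ n := by simp [K2] at hl; omega
          have hrinf : ¬ PL <:+: r := fun hc => hinf (hc.trans (List.suffix_append K2 r).isInfix)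
          rw [passes_br2, scanGo_br2, ih r hrlen hrinf]
        · by_cases h3 : K3.isPrefixOf (c :: t)
          · obtain ⟨r, hr⟩ := List.isPrefixOf_iff_prefix.mp h3
            rw [← hr] at hl hinf ⊢
            have hrlen : r.length ≤ n := by simp [K3] at hl; omega
            have hrinf : ¬ PL <:+: r := fun hc => hinf (hc.trans (List.suffix_append K3 r).isInfix)
            rw [passes_br3, scanGo_br3, ih r hrlen hrinf]
          · by_cases h4 : K4.isPrefixOf (c :: t)
            · obtain ⟨r, hr⟩ := List.isPrefixOf_iff_prefix.mp h4
              rw [← hr] at hl hinf ⊢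
              have hrlen : r.length ≤ n := by simp [K4] at hl; omega
              have hrinf : ¬ PL <:+: r := fun hc => hinf (hc.trans (List.suffix_append K4 r).isInfix)
              have hOSr : ¬ OS <+: r := fun hc => hinf (OS_prefix_K4_append r hc).isInfix
              rw [passes_br4 r hOSr, scanGo_br4, ih r hrlen hrinf]
            · by_cases h5 : K5.isPrefixOf (c :: t)
              · obtain ⟨r, hr⟩ := List.isPrefixOf_iff_prefix.mp h5
                rw [← hr] at hl hinf ⊢
                have hrlen : r.length ≤ n := by simp [K5] at hl; omega
                have hrinf : ¬ PL <:+: r := fun hc => hinf (hc.trans (List.suffix_append K5 r).isInfix)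
                rw [passes_br5, scanGo_br5, ih r hrlen hrinf]
              · by_cases h6 : K6.isPrefixOf (c :: t)
                · obtain ⟨r, hr⟩ := List.isPrefixOf_iff_prefix.mp h6
                  rw [← hr] at hl hinf ⊢
                  have hrlen : r.length ≤ n := by simp [K6] at hl; omega
                  have hrinf : ¬ PL <:+: r := fun hc => hinf (hc.trans (List.suffix_append K6 r).isInfix)
                  rw [passes_br6, scanGo_br6, ih r hrlen hrinf]
                · have htlen : t.length ≤ n := by simp at hl; omega
                  have htinf : ¬ PL <:+: t := fun hc => hinf (hc.trans (List.suffix_cons c t).isInfix)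
                  rw [passes_cons_neg c t h1 h2 h3 h4 h5 h6, scanGo_cons_neg c t h1 h2 h3 h4 h5 h6,
                      ih t htlen htinf]

-- wherever the cascade pattern occurs, the two programs really disagree
theorem passes_ne_scanGo : ∀ (n : Nat) (l : List Char), l.length ≤ n → PL <:+: l →
    passes l ≠ scanGo l := by
  intro n
  induction n with
  | zero =>
    intro l hl hpl
    have : l = [] := List.length_eq_zero_iff.mp (Nat.le_zero.mp hl)
    subst this
    simp [PL] at hpl
  | succ n ih =>
    intro l hl hpl
    cases l with
    | nil => simp [PL] at hpl
    | cons c t =>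
      by_cases h1 : K1.isPrefixOf (c :: t)
      · obtain ⟨r, hr⟩ := List.isPrefixOf_iff_prefix.mp h1
        rw [← hr] at hl hpl ⊢
        have hrlen : r.length ≤ n := by simp [K1] at hl; omega
        have hrpl : PL <:+: r := infix_through K1 (by decide) r hpl
        rw [passes_br1, scanGo_br1]
        exact fun he => ih r hrlen hrpl (List.append_cancel_left he)
      · by_cases h2 : K2.isPrefixOf (c :: t)
        · obtain ⟨r, hr⟩ := List.isPrefixOf_iff_prefix.mp h2
          rw [← hr] at hl hpl ⊢
          have hrlen : r.length ≤ n := by simp [K2] at hl; omega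
          have hrpl : PL <:+: r := infix_through K2 (by decide) r hpl
          rw [passes_br2, scanGo_br2]
          exact fun he => ih r hrlen hrpl (List.append_cancel_left he)
        · by_cases h3 : K3.isPrefixOf (c :: t)
          · obtain ⟨r, hr⟩ := List.isPrefixOf_iff_prefix.mp h3
            rw [← hr] at hl hpl ⊢
            have hrlen : r.length ≤ n := by simp [K3] at hl; omega
            have hrpl : PL <:+: r := infix_through K3 (by decide) r hpl
            rw [passes_br3, scanGo_br3]
            exact fun he => ih r hrlen hrpl (List.append_cancel_left he)
          · by_cases h4 : K4.isPrefixOf (c :: t)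
            · obtain ⟨r, hr⟩ := List.isPrefixOf_iff_prefix.mp h4
              rw [← hr] at hl hpl ⊢
              have hrlen : r.length ≤ n := by simp [K4] at hl; omega
              by_cases hOS : OS <+: r
              · -- the difference materialises here: A emits 'ffs…', B emits 'ffo…'
                obtain ⟨r', hr'⟩ := id hOS
                rw [passes_br4_diff r hOS, scanGo_br4, ← hr',
                    show (OS : List Char) ++ r' = 'o' :: (OS.drop 1 ++ r') from rfl, scanGo_o]
                intro he
                simp [A4] at he
              · have hrpl : PL <:+: r := by
                  rw [show (K4 : List Char) ++ r = 'f' :: (K4.drop 1 ++ r) from rfl] at hpl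
                  rcases List.infix_cons_iff.mp hpl with h' | h'
                  · exact absurd (PL_prefix_OS r (h' : PL <+: K4 ++ r)) hOS
                  · exact infix_through (K4.drop 1) (by decide) r h'
                rw [passes_br4 r hOS, scanGo_br4]
                exact fun he => ih r hrlen hrpl (List.append_cancel_left he)
            · by_cases h5 : K5.isPrefixOf (c :: t)
              · obtain ⟨r, hr⟩ := List.isPrefixOf_iff_prefix.mp h5
                rw [← hr] at hl hpl ⊢
                have hrlen : r.length ≤ n := by simp [K5] at hl; omega
                have hrpl : PL <:+: r := infix_through K5 (by decide) r hpl
                rw [passes_br5, scanGo_br5]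
                exact fun he => ih r hrlen hrpl (List.append_cancel_left he)
              · by_cases h6 : K6.isPrefixOf (c :: t)
                · obtain ⟨r, hr⟩ := List.isPrefixOf_iff_prefix.mp h6
                  rw [← hr] at hl hpl ⊢
                  have hrlen : r.length ≤ n := by simp [K6] at hl; omega
                  have hrpl : PL <:+: r := infix_through K6 (by decide) r hpl
                  rw [passes_br6, scanGo_br6]
                  exact fun he => ih r hrlen hrpl (List.append_cancel_left he)
                · have htlen : t.length ≤ n := by simp at hl; omega
                  have htpl : PL <:+: t := by
                    rcases List.infix_cons_iff.mp hpl with h' | h'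
                    · exact absurd (List.isPrefixOf_iff_prefix.mpr
                        ((show (K4 : List Char) <+: PL from by decide).trans h')) h4
                    · exact h'
                  rw [passes_cons_neg c t h1 h2 h3 h4 h5 h6, scanGo_cons_neg c t h1 h2 h3 h4 h5 h6]
                  intro he
                  exact ih t htlen htpl (by simpa using he)

theorem A_eq_passes (s : String) :
    compress_attributes_py s = String.ofList (passes s.toList) := by
  have h : compress_attributes_py s =
      PySem.Str.replace (PySem.Str.replace (PySem.Str.replace (PySem.Str.replace (PySem.Str.replace
        (PySem.Str.replace s "stroke-width" "sw") "stroke-linecap" "slc") "stroke-linejoin" "slj")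
        "font-family" "ff") "font-size" "fs") "text-anchor" "ta" := rfl
  have step : ∀ (x old new : String), old.toList ≠ [] →
      PySem.Str.replace x old new = String.ofList (scan1 old.toList new.toList x.toList) :=
    fun x old new hx => congrArg String.ofList (replace_eq_scan1 x.toList old.toList new.toList hx)
  rw [h, step _ _ _ (by decide), step _ _ _ (by decide), step _ _ _ (by decide),
      step _ _ _ (by decide), step _ _ _ (by decide), step _ _ _ (by decide)]
  simp only [String.toList_ofList]
  rw [show ("stroke-width" : String).toList = K1 from by decide,
      show ("sw" : String).toList = A1 from by decide,
      show ("stroke-linecap" : String).toList = K2 from by decide,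
      show ("slc" : String).toList = A2 from by decide,
      show ("stroke-linejoin" : String).toList = K3 from by decide,
      show ("slj" : String).toList = A3 from by decide,
      show ("font-family" : String).toList = K4 from by decide,
      show ("ff" : String).toList = A4 from by decide,
      show ("font-size" : String).toList = K5 from by decide,
      show ("fs" : String).toList = A5 from by decide,
      show ("text-anchor" : String).toList = K6 from by decide,
      show ("ta" : String).toList = A6 from by decide]
  rfl

-- evaluate B on the witness (scanGo is defined by well-founded recursion, so not by `decide`)
theorem scanGo_witness :
    scanGo (String.toList "font-familyont-size") = String.toList "ffont-size" := by
  rw [show String.toList "font-familyont-size" = K4 ++ OS from by decide, scanGo_br4]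
  rw [show (OS : List Char) = 'o'::'n'::'t'::'-'::'s'::'i'::'z'::'e'::([] : List Char) from rfl]
  rw [scanGo, if_neg (by decide), if_neg (by decide), if_neg (by decide), if_neg (by decide),
      if_neg (by decide), if_neg (by decide)]
  rw [scanGo, if_neg (by decide), if_neg (by decide), if_neg (by decide), if_neg (by decide),
      if_neg (by decide), if_neg (by decide)]
  rw [scanGo, if_neg (by decide), if_neg (by decide), if_neg (by decide), if_neg (by decide),
      if_neg (by decide), if_neg (by decide)]
  rw [scanGo, if_neg (by decide), if_neg (by decide), if_neg (by decide), if_neg (by decide),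
      if_neg (by decide), if_neg (by decide)]
  rw [scanGo, if_neg (by decide), if_neg (by decide), if_neg (by decide), if_neg (by decide),
      if_neg (by decide), if_neg (by decide)]
  rw [scanGo, if_neg (by decide), if_neg (by decide), if_neg (by decide), if_neg (by decide),
      if_neg (by decide), if_neg (by decide)]
  rw [scanGo, if_neg (by decide), if_neg (by decide), if_neg (by decide), if_neg (by decide),
      if_neg (by decide), if_neg (by decide)]
  rw [scanGo, if_neg (by decide), if_neg (by decide), if_neg (by decide), if_neg (by decide),
      if_neg (by decide), if_neg (by decide)]
  rw [show scanGo ([] : List Char) = [] from by rw [scanGo]]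
  decide

-- ===== VERDICT (by name: the statement is the Claim_ definition above) =====
theorem compress_attributes_py_spec : Claim_unchanged_compress_attributes_py := by
  intro s _
  unfold Spec_compress_attributes_py
  intro hnd
  rw [A_eq_passes]
  unfold compress_attributes_py_alt
  have hinf : ¬ (PL <:+: s.toList) := by
    intro hcon
    apply hnd
    unfold D_compress_attributes_py
    rw [PySem.Str.isIn_iff_infix]
    have hPL : "font-familyont-size".toList = PL := by decide
    rw [hPL]
    exact hcon
  exact congrArg _ (passes_eq_scanGo s.toList.length s.toList le_rfl hinf)

theorem compress_attributes_py_changed : Claim_changed_compress_attributes_py := by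
  unfold Claim_changed_compress_attributes_py
  refine ⟨by decide, by decide, by decide, ?_, by decide⟩
  show String.ofList (scanGo (String.toList "font-familyont-size")) = _
  rw [scanGo_witness]
  decide

theorem compress_attributes_py_tight : Claim_exact_compress_attributes_py := by
  intro s _ hD
  have hpl : PL <:+: s.toList := by
    unfold D_compress_attributes_py at hD
    rw [PySem.Str.isIn_iff_infix] at hD
    rwa [show "font-familyont-size".toList = PL from by decide] at hD
  intro he
  apply passes_ne_scanGo s.toList.length s.toList le_rfl hpl
  rw [A_eq_passes] at he
  unfold compress_attributes_py_alt at he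
  have h2 := congrArg String.toList he
  simpa using h2
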